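-- pv_equiv track=rewrite | github.com/game-difficulty/2048EndgameTablebase | backend/handlers/game.py | _gamer_simulate_line
-- ===== SOURCE A (Python) =====
-- def _gamer_simulate_line(values):
--     result = [0, 0, 0, 0]
--     distances = [0, 0, 0, 0]
--     pops = [0, 0, 0, 0]
--     score_delta = 0
--
--     non_zero = [
--         (idx, int(value)) for idx, value in enumerate(values) if int(value) != 0
--     ]
--     read = 0
--     write = 0
--     while read < len(non_zero):
--         source_index, value = non_zero[read]
--         if read + 1 < len(non_zero) and non_zero[read + 1][1] == value:
--             next_source_index, _ = non_zero[read + 1]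
--             merged_value = value * 2
--             result[write] = merged_value
--             score_delta += merged_value
--             distances[source_index] = source_index - write
--             distances[next_source_index] = next_source_index - write
--             pops[write] = 1
--             read += 2
--         else:
--             result[write] = value
--             distances[source_index] = source_index - write
--             read += 1
--         write += 1
--
--     return result, distances, pops, score_delta
-- ===== SOURCE B (Python) =====
-- def _gamer_simulate_line(values):
--     result = [0, 0, 0, 0]
--     distances = [0, 0, 0, 0]
--     pops = [0, 0, 0, 0]
--     score_delta = 0
--
--     write = 0
--     mergeable = False
--     for src, value in enumerate(values):
--         value = int(value)
--         if value == 0: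
--             continue
--         if mergeable and result[write - 1] == value:
--             merged_value = 2 * value
--             result[write - 1] = merged_value
--             score_delta += merged_value
--             pops[write - 1] = 1
--             distances[src] = src - (write - 1)
--             mergeable = False
--         else:
--             result[write] = value
--             distances[src] = src - write
--             write += 1
--             mergeable = True
--
--     return result, distances, pops, score_delta
-- ===== Notes on version B (the rewrite author's own statement) =====
-- stated objective: alternative
-- what changed: Replaced the read/write two-pointer lookahead over a pre-built non-zero list by a single pass over the values with a write pointer and a 'mergeable' flag that folds a tile into the previously written cell.
import Mathlib
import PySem

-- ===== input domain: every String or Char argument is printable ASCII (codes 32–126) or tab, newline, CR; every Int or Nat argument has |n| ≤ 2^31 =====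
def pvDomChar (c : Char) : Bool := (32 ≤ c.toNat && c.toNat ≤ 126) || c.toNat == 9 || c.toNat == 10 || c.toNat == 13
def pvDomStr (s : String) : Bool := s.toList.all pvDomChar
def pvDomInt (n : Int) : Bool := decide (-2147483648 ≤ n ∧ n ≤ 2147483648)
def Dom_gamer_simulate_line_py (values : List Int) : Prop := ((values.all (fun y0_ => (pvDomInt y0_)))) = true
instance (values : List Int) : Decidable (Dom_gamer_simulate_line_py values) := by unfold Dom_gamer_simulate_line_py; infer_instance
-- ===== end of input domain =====

-- B replaces A's lookahead two-pointer pass over a pre-built non-zero list with a single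
-- one-tile-at-a-time pass keeping a write pointer and a 'mergeable' flag (alternative decomposition).

-- ===== PORT A =====
-- A's while loop over non_zero with read/write pointers; the read pointer is represented by the
-- remaining suffix of non_zero (read += 1 drops one pair, read += 2 drops two).
def gamerLoopA : List (Int × Int) → Int →
    (List Int × List Int × List Int × Int) → (List Int × List Int × List Int × Int)
  | [], _, st => st
  | [(si, v)], w, (r, d, p, s) =>
      gamerLoopA [] (w + 1)
        (PySem.List.pySetD r w v, PySem.List.pySetD d si (si - w), p, s)
  | (si, v) :: (si2, v2) :: rest2, w, (r, d, p, s) =>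
      if v2 = v then
        gamerLoopA rest2 (w + 1)
          (PySem.List.pySetD r w (v * 2),
           PySem.List.pySetD (PySem.List.pySetD d si (si - w)) si2 (si2 - w),
           PySem.List.pySetD p w 1, s + v * 2)
      else
        gamerLoopA ((si2, v2) :: rest2) (w + 1)
          (PySem.List.pySetD r w v, PySem.List.pySetD d si (si - w), p, s)
  termination_by l _ _ => l.length
  decreasing_by all_goals simp

def gamer_simulate_line_py (values : List Int) : List Int × List Int × List Int × Int :=
  let non_zero := (PySem.List.enumerate values 0).filter (fun q => !(q.2 == 0))
  gamerLoopA non_zero 0 ([0, 0, 0, 0], [0, 0, 0, 0], [0, 0, 0, 0], 0)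

-- ===== PORT B =====
-- B's for-loop over enumerate(values): src is the running source index, w the write pointer,
-- m the 'mergeable' flag.
def gamerLoopB : List Int → Int → Int → Bool →
    (List Int × List Int × List Int × Int) → (List Int × List Int × List Int × Int)
  | [], _, _, _, st => st
  | v :: rest, src, w, m, (r, d, p, s) =>
    if v = 0 then gamerLoopB rest (src + 1) w m (r, d, p, s)
    else if m && (PySem.List.pyGetD r (w - 1) 0 == v) then
      gamerLoopB rest (src + 1) w false
        (PySem.List.pySetD r (w - 1) (2 * v),
         PySem.List.pySetD d src (src - (w - 1)),
         PySem.List.pySetD p (w - 1) 1, s + 2 * v)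
    else
      gamerLoopB rest (src + 1) (w + 1) true
        (PySem.List.pySetD r w v, PySem.List.pySetD d src (src - w), p, s)

def gamer_simulate_line_py_alt (values : List Int) : List Int × List Int × List Int × Int :=
  gamerLoopB values 0 0 false ([0, 0, 0, 0], [0, 0, 0, 0], [0, 0, 0, 0], 0)

-- ===== PRECONDITION & SPEC =====
-- Pre_ excludes exactly the inputs on which A raises IndexError: a non-zero value at an index >= 4
-- overruns the fixed 4-cell result/distances/pops lists (B raises there as well).
def Pre_gamer_simulate_line_py (values : List Int) : Prop := ∀ x ∈ values.drop 4, x = 0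
instance (values : List Int) : Decidable (Pre_gamer_simulate_line_py values) := by
  unfold Pre_gamer_simulate_line_py; infer_instance

def pvWitness_gamer_simulate_line_py : List Int := [2, 2, 4, 0]

def Spec_gamer_simulate_line_py (values : List Int) (out : List Int × List Int × List Int × Int) : Prop := out = gamer_simulate_line_py_alt values
instance (values : List Int) (out : List Int × List Int × List Int × Int) : Decidable (Spec_gamer_simulate_line_py values out) := by unfold Spec_gamer_simulate_line_py; infer_instance

-- ===== CLAIM (what is proved, stated in full; the proofs are below) =====
def Claim_equal_gamer_simulate_line_py : Prop := ∀ (values : List Int), Dom_gamer_simulate_line_py values → Pre_gamer_simulate_line_py values → Spec_gamer_simulate_line_py values (gamer_simulate_line_py values)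

-- ===== LEMMAS AND PROOFS =====

-- Proof-only helper: the (index, value) pairs of the non-zero entries of l, indices starting at i.
def nzFrom : List Int → Int → List (Int × Int)
  | [], _ => []
  | v :: rest, i => if v = 0 then nzFrom rest (i + 1) else (i, v) :: nzFrom rest (i + 1)

theorem filter_enumerate_eq_nzFrom (l : List Int) (i : Int) :
    (PySem.List.enumerate l i).filter (fun q => !(q.2 == 0)) = nzFrom l i := by
  induction l generalizing i with
  | nil => simp [nzFrom]
  | cons v rest ih =>
    simp only [PySem.List.enumerate_cons, List.filter_cons, nzFrom]
    by_cases h : v = 0 <;> simp [h, ih]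

theorem nzFrom_length_le (l : List Int) (i : Int) : (nzFrom l i).length ≤ l.length := by
  induction l generalizing i with
  | nil => simp [nzFrom]
  | cons v rest ih =>
    simp only [nzFrom]
    by_cases h : v = 0 <;> simp [h] <;> exact Nat.le_trans (ih _) (by omega)

theorem nzFrom_append (a b : List Int) (i : Int) :
    nzFrom (a ++ b) i = nzFrom a i ++ nzFrom b (i + a.length) := by
  induction a generalizing i with
  | nil => simp [nzFrom]
  | cons v rest ih =>
    simp only [List.cons_append, nzFrom, ih]
    by_cases h : v = 0 <;> simp [h] <;> ring_nf

theorem nzFrom_all_zero (b : List Int) (i : Int) (h : ∀ x ∈ b, x = 0) : nzFrom b i = [] := by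
  induction b generalizing i with
  | nil => rfl
  | cons v rest ih =>
    have hv : v = 0 := h v (by simp)
    simp only [nzFrom, hv]
    exact ih _ (fun x hx => h x (by simp [hx]))

-- Proof-only helper: B's loop restricted to the non-zero (index, value) pairs.
def gamerLoopB2 : List (Int × Int) → Int → Bool →
    (List Int × List Int × List Int × Int) → (List Int × List Int × List Int × Int)
  | [], _, _, st => st
  | (src, v) :: rest, w, m, (r, d, p, s) =>
    if m && (PySem.List.pyGetD r (w - 1) 0 == v) then
      gamerLoopB2 rest w false
        (PySem.List.pySetD r (w - 1) (2 * v),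
         PySem.List.pySetD d src (src - (w - 1)),
         PySem.List.pySetD p (w - 1) 1, s + 2 * v)
    else
      gamerLoopB2 rest (w + 1) true
        (PySem.List.pySetD r w v, PySem.List.pySetD d src (src - w), p, s)

theorem loopB_eq_B2 (l : List Int) (src w : Int) (m : Bool)
    (st : List Int × List Int × List Int × Int) :
    gamerLoopB l src w m st = gamerLoopB2 (nzFrom l src) w m st := by
  induction l generalizing src w m st with
  | nil => obtain ⟨r, d, p, s⟩ := st; rfl
  | cons v rest ih =>
    obtain ⟨r, d, p, s⟩ := st
    by_cases hv : v = 0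
    · simp [gamerLoopB, nzFrom, hv, ih]
    · simp only [gamerLoopB, nzFrom, hv, if_false, gamerLoopB2]
      by_cases hm : (m && (PySem.List.pyGetD r (w - 1) 0 == v)) = true
      · simp [hm, ih]
      · simp [hm, ih]

theorem pyGetD_pySetD_self (r : List Int) (w : Int) (v : Int)
    (h0 : 0 ≤ w) (hlt : w.toNat < r.length) :
    PySem.List.pyGetD (PySem.List.pySetD r w v) w 0 = v := by
  rw [PySem.List.pySetD_of_nonneg _ _ h0]
  have hw : (w.toNat : Int) = w := Int.toNat_of_nonneg h0
  rw [show PySem.List.pyGetD (r.set w.toNat v) w 0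
      = PySem.List.pyGetD (r.set w.toNat v) ((w.toNat : Int)) 0 from by rw [hw]]
  rw [PySem.List.pyGetD_natCast]
  rw [List.getD_eq_getElem?_getD, List.getElem?_set_self (by simpa using hlt)]
  rfl

theorem loopA_eq_B2 (n : Nat) : ∀ (nz : List (Int × Int)) (w : Int)
    (r d p : List Int) (s : Int), nz.length ≤ n →
    r.length = 4 → 0 ≤ w → w + nz.length ≤ 4 →
    gamerLoopA nz w (r, d, p, s) = gamerLoopB2 nz w false (r, d, p, s) := by
  induction n with
  | zero =>
    intro nz w r d p s hn _ _ _
    have : nz = [] := List.length_eq_zero_iff.mp (Nat.le_zero.mp hn)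
    subst this; simp [gamerLoopA, gamerLoopB2]
  | succ n ih =>
    intro nz w r d p s hn hr hw hb
    match nz with
    | [] => simp [gamerLoopA, gamerLoopB2]
    | [(si, v)] =>
      simp [gamerLoopA, gamerLoopB2]
    | (si, v) :: (si2, v2) :: rest2 =>
      simp only [List.length_cons] at hn hb
      push_cast at hb
      have hwr : w.toNat < r.length := by omega
      have hget0 : PySem.List.pyGetD (PySem.List.pySetD r w v) w 0 = v :=
        pyGetD_pySetD_self r w v hw hwr
      have hlenv : ∀ u : Int, (PySem.List.pySetD r w u).length = 4 := by
        intro u; rw [PySem.List.pySetD_of_nonneg _ _ hw]; simpa using hr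
      -- unfold one step of B2 (flag false forces the write branch)
      have hB2step : gamerLoopB2 ((si, v) :: (si2, v2) :: rest2) w false (r, d, p, s)
          = gamerLoopB2 ((si2, v2) :: rest2) (w + 1) true
              (PySem.List.pySetD r w v, PySem.List.pySetD d si (si - w), p, s) := by
        simp [gamerLoopB2]
      rw [hB2step]
      by_cases hv : v2 = v
      · -- A merges; B's next step folds the tile into the cell just written
        subst hv
        have hB2merge : gamerLoopB2 ((si2, v2) :: rest2) (w + 1) true
              (PySem.List.pySetD r w v2, PySem.List.pySetD d si (si - w), p, s)
            = gamerLoopB2 rest2 (w + 1) false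
              (PySem.List.pySetD (PySem.List.pySetD r w v2) (w + 1 - 1) (2 * v2),
               PySem.List.pySetD (PySem.List.pySetD d si (si - w)) si2 (si2 - (w + 1 - 1)),
               PySem.List.pySetD p (w + 1 - 1) 1, s + 2 * v2) := by
          simp [gamerLoopB2, hget0]
        rw [hB2merge]
        have e3 : w + 1 - 1 = w := by ring
        have e1 : PySem.List.pySetD (PySem.List.pySetD r w v2) (w + 1 - 1) (2 * v2)
            = PySem.List.pySetD r w (v2 * 2) := by
          rw [e3, PySem.List.pySetD_of_nonneg _ _ hw, PySem.List.pySetD_of_nonneg _ _ hw,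
            PySem.List.pySetD_of_nonneg _ _ hw, List.set_set, Int.mul_comm]
        have e2 : si2 - (w + 1 - 1) = si2 - w := by ring
        have e4 : s + 2 * v2 = s + v2 * 2 := by ring
        rw [e1, e2, e3, e4]
        rw [show gamerLoopA ((si, v2) :: (si2, v2) :: rest2) w (r, d, p, s)
            = gamerLoopA rest2 (w + 1)
              (PySem.List.pySetD r w (v2 * 2),
               PySem.List.pySetD (PySem.List.pySetD d si (si - w)) si2 (si2 - w),
               PySem.List.pySetD p w 1, s + v2 * 2) from by simp [gamerLoopA]]
        exact ih rest2 (w + 1) _ _ _ _ (by omega) (hlenv _) (by omega) (by omega)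
      · -- A writes one tile; the flag cannot fire on the next (different) tile
        have hne : (true && (PySem.List.pyGetD (PySem.List.pySetD r w v) (w + 1 - 1) 0 == v2)) = false := by
          have e : w + 1 - 1 = w := by ring
          rw [Bool.true_and, e, hget0]
          exact beq_eq_false_iff_ne.mpr (fun h => hv h.symm)
        have hB2skip : gamerLoopB2 ((si2, v2) :: rest2) (w + 1) true
              (PySem.List.pySetD r w v, PySem.List.pySetD d si (si - w), p, s)
            = gamerLoopB2 ((si2, v2) :: rest2) (w + 1) false
              (PySem.List.pySetD r w v, PySem.List.pySetD d si (si - w), p, s) := by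
          conv_lhs => rw [gamerLoopB2]
          conv_rhs => rw [gamerLoopB2]
          rw [hne]
          simp
        rw [hB2skip]
        rw [show gamerLoopA ((si, v) :: (si2, v2) :: rest2) w (r, d, p, s)
            = gamerLoopA ((si2, v2) :: rest2) (w + 1)
              (PySem.List.pySetD r w v, PySem.List.pySetD d si (si - w), p, s) from by
          simp [gamerLoopA, hv]]
        exact ih ((si2, v2) :: rest2) (w + 1) _ _ _ _
          (by simp only [List.length_cons]; omega) (hlenv _) (by omega)
          (by simp only [List.length_cons]; push_cast; omega)

theorem nz_short (values : List Int) (h : Pre_gamer_simulate_line_py values) :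
    (nzFrom values 0).length ≤ 4 := by
  have hsplit : nzFrom values 0 = nzFrom (values.take 4) 0
      ++ nzFrom (values.drop 4) (0 + (values.take 4).length) := by
    conv_lhs => rw [← List.take_append_drop 4 values]
    exact nzFrom_append _ _ _
  rw [hsplit, nzFrom_all_zero _ _ h, List.append_nil]
  exact Nat.le_trans (nzFrom_length_le _ _) (by simp)

-- ===== VERDICT (by name: the statement is the Claim_ definition above) =====
theorem gamer_simulate_line_py_spec : Claim_equal_gamer_simulate_line_py := by
  intro values _hdom hpre
  unfold Spec_gamer_simulate_line_py gamer_simulate_line_py gamer_simulate_line_py_alt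
  rw [filter_enumerate_eq_nzFrom, loopB_eq_B2]
  show gamerLoopA (nzFrom values 0) 0 ([0, 0, 0, 0], [0, 0, 0, 0], [0, 0, 0, 0], 0)
      = gamerLoopB2 (nzFrom values 0) 0 false ([0, 0, 0, 0], [0, 0, 0, 0], [0, 0, 0, 0], 0)
  exact (loopA_eq_B2 (nzFrom values 0).length (nzFrom values 0) 0
    [0, 0, 0, 0] [0, 0, 0, 0] [0, 0, 0, 0] 0 le_rfl (by rfl) le_rfl
    (by have := nz_short values hpre; omega))
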